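-- pv_equiv track=rewrite | github.com/sqoshi/hands-to-text | package/hands_to_text/text/strategy.py | process
-- ===== SOURCE A (Python) =====
-- def process(text: str, min_reps: int = 3) -> str:
--     result = ""
--     current_symbol = None
--     current_count = 0
--
--     for symbol in text:
--         if symbol == current_symbol:
--             current_count += 1
--         else:
--             if current_count >= min_reps:
--                 result += current_symbol * current_count
--             current_symbol = symbol
--             current_count = 1
--
--     if current_symbol and current_count >= min_reps:
--         result += current_symbol * current_count
--
--     return result
-- ===== SOURCE B (Python) =====
-- def process(text: str, min_reps: int = 3) -> str:
--     n = len(text)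
--     cuts = [i for i in range(n + 1) if i == 0 or i == n or text[i] != text[i - 1]]
--     return "".join(text[a:b] for a, b in zip(cuts, cuts[1:]) if b - a >= min_reps)
-- ===== Notes on version B (the rewrite author's own statement) =====
-- stated objective: alternative
-- what changed: Replaces A's single-pass state machine (current_symbol/current_count with a trailing post-loop emission) by two staged passes: a comprehension that collects run-boundary indices by comparing each character with its predecessor, then a join of the slices between consecutive boundary pairs that meet the threshold.
-- crash fix: For nonempty text with min_reps <= 0, A raises TypeError (it multiplies None by an int at the first group boundary); B returns the whole text, since every run trivially meets the threshold. — e.g. on process("aa", 0): A raises TypeError, B returns "aa"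
import Mathlib
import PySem

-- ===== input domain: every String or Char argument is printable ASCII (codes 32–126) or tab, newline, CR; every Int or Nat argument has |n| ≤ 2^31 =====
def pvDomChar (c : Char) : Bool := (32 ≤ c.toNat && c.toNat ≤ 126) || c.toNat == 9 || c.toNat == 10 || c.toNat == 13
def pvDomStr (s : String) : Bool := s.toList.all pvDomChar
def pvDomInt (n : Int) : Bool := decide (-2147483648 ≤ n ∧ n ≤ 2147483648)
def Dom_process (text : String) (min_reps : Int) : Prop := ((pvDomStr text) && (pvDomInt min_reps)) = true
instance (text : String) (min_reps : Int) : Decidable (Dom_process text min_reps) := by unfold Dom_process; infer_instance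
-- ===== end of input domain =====

-- B replaces A's per-character state machine by two staged passes: a boundary-index list, then a join of qualifying slices (alternative decomposition; same cost). 


-- ===== PORT A =====
-- one loop step: state (result, current_symbol, current_count)
def processStep (min_reps : Int) (s : List Char × Option Char × Int) (c : Char) :
    List Char × Option Char × Int :=
  if some c == s.2.1 then (s.1, s.2.1, s.2.2 + 1)
  else
    -- 'result += current_symbol * current_count'; with current_symbol = None Python raises
    -- TypeError here (excluded by Pre_process), so the 'none' arm is unreachable inside Pre_.
    let res := if min_reps ≤ s.2.2 then
        s.1 ++ (match s.2.1 with | some t => List.replicate s.2.2.toNat t | none => []) else s.1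
    (res, some c, 1)

def processFin (min_reps : Int) (s : List Char × Option Char × Int) : List Char :=
  match s.2.1 with
  | none => s.1      -- 'if current_symbol' falsy
  | some c => if min_reps ≤ s.2.2 then s.1 ++ List.replicate s.2.2.toNat c else s.1

def process (text : String) (min_reps : Int) : String :=
  String.mk (processFin min_reps (text.toList.foldl (processStep min_reps) ([], none, 0)))

-- ===== PORT B =====
-- 'cuts = [i for i in range(n + 1) if i == 0 or i == n or text[i] != text[i - 1]]'
-- (every index read is in range and nonnegative here, so List.getElem? is exact for text[i])
def cutsOf (l : List Char) : List Nat :=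
  (List.range (l.length + 1)).filter (fun i => i == 0 || i == l.length || !(l[i]? == l[i - 1]?))

-- '"".join(text[a:b] for a, b in zip(cuts, cuts[1:]) if b - a >= min_reps)'
-- (text[a:b] with 0 ≤ a ≤ b ≤ n is exactly (drop a).take (b - a))
def joinSlices (min_reps : Int) (l : List Char) (cuts : List Nat) : List Char :=
  (cuts.zip (cuts.drop 1)).flatMap
    (fun p => if min_reps ≤ (p.2 : Int) - (p.1 : Int) then (l.drop p.1).take (p.2 - p.1) else [])

def process_alt (text : String) (min_reps : Int) : String :=
  String.mk (joinSlices min_reps text.toList (cutsOf text.toList))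

-- ===== PRECONDITION & SPEC =====
-- Pre_ excludes only inputs where A raises TypeError: nonempty text with min_reps ≤ 0
-- (A multiplies None by an int at the first group boundary).
def Pre_process (text : String) (min_reps : Int) : Prop := 1 ≤ min_reps ∨ text = ""
instance (text : String) (min_reps : Int) : Decidable (Pre_process text min_reps) := by
  unfold Pre_process; infer_instance
def pvWitness_process : String × Int := ("aaabbcc", 3)

-- For nonempty text with min_reps ≤ 0, A raises TypeError (it multiplies None by an int at the
-- first group boundary); B returns the whole text, since every run trivially meets the threshold.
def Raises_process (text : String) (min_reps : Int) : Prop := text ≠ "" ∧ min_reps ≤ 0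
instance (text : String) (min_reps : Int) : Decidable (Raises_process text min_reps) := by
  unfold Raises_process; infer_instance
def pvRaiseWitness_process : String × Int := ("aa", 0)
def pvRaiseWitnessOut_process : String := "aa"

def Spec_process (text : String) (min_reps : Int) (out : String) : Prop := out = process_alt text min_reps
instance (text : String) (min_reps : Int) (out : String) : Decidable (Spec_process text min_reps out) := by unfold Spec_process; infer_instance

-- ===== CLAIM (what is proved, stated in full; the proofs are below) =====
def Claim_equal_process : Prop := ∀ (text : String) (min_reps : Int), Dom_process text min_reps → Pre_process text min_reps → Spec_process text min_reps (process text min_reps)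
def Claim_raises_process : Prop := (∀ (text : String) (min_reps : Int), Dom_process text min_reps → Raises_process text min_reps → ¬ Pre_process text min_reps) ∧ (Dom_process (pvRaiseWitness_process.1) (pvRaiseWitness_process.2) ∧ Raises_process (pvRaiseWitness_process.1) (pvRaiseWitness_process.2) ∧ process_alt (pvRaiseWitness_process.1) (pvRaiseWitness_process.2) = pvRaiseWitnessOut_process)

-- ===== LEMMAS AND PROOFS =====

-- canonical run-keeping recursion; both ports are reduced to it
def runsGo (min_reps : Int) : List Char → List Char
  | [] => []
  | c :: t =>
    let run := c :: t.takeWhile (· == c)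
    let rest := t.dropWhile (· == c)
    if min_reps ≤ (run.length : Int) then run ++ runsGo min_reps rest
    else runsGo min_reps rest
termination_by l => l.length
decreasing_by all_goals
  · simp only [List.length_cons]
    have := List.length_dropWhile_le (p := (· == c)) (l := t)
    omega

def emitRun (min_reps : Int) (c : Char) (n : Int) : List Char :=
  if min_reps ≤ n then List.replicate n.toNat c else []

theorem takeWhile_eq_replicate (c : Char) (t : List Char) :
    t.takeWhile (· == c) = List.replicate (t.takeWhile (· == c)).length c := by
  induction t with
  | nil => simp
  | cons d t ih =>
    by_cases h : d = c
    · subst h; simpa [List.replicate_succ] using ih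
    · simp [h]

theorem runsGo_cons (min_reps : Int) (c : Char) (t : List Char) :
    runsGo min_reps (c :: t) =
      emitRun min_reps c (1 + (t.takeWhile (· == c)).length) ++
        runsGo min_reps (t.dropWhile (· == c)) := by
  rw [runsGo, emitRun]
  simp only [List.length_cons]
  split_ifs with h h' h'
  · congr 1
    rw [show ((1 : Int) + ((t.takeWhile (· == c)).length : Int)).toNat
          = (t.takeWhile (· == c)).length + 1 by omega, List.replicate_succ]
    exact congrArg (c :: ·) (takeWhile_eq_replicate c t)
  · exact absurd h' (by push_cast at h ⊢; omega)
  · exact absurd h (by push_cast at h' ⊢; omega)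
  · simp

theorem main_invariant (min_reps : Int) (l : List Char) :
    ∀ (res : List Char) (c : Char) (cnt : Int), 1 ≤ cnt →
    processFin min_reps (l.foldl (processStep min_reps) (res, some c, cnt)) =
      res ++ emitRun min_reps c (cnt + (l.takeWhile (· == c)).length) ++
        runsGo min_reps (l.dropWhile (· == c)) := by
  induction l with
  | nil =>
    intro res c cnt h
    simp only [List.foldl_nil, List.takeWhile_nil, List.dropWhile_nil, runsGo,
      List.length_nil, Nat.cast_zero, add_zero, List.append_nil]
    simp [processFin, emitRun]; split_ifs <;> simp
  | cons d t ih =>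
    intro res c cnt h
    by_cases hdc : d = c
    · subst hdc
      rw [List.foldl_cons, show processStep min_reps (res, some d, cnt) d = (res, some d, cnt + 1) by
        simp [processStep]]
      rw [ih res d (cnt + 1) (by omega)]
      simp only [List.takeWhile_cons, List.dropWhile_cons, beq_self_eq_true, if_true,
        List.length_cons]
      congr 3
      push_cast; ring
    · rw [List.foldl_cons, show processStep min_reps (res, some c, cnt) d =
          (res ++ emitRun min_reps c cnt, some d, 1) by
        simp [processStep, hdc, emitRun]
        split_ifs <;> simp]
      rw [ih (res ++ emitRun min_reps c cnt) d 1 le_rfl]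
      have hne : (d == c) = false := by simpa using hdc
      simp only [List.takeWhile_cons, List.dropWhile_cons, hne, if_neg, Bool.false_eq_true,
        not_false_eq_true, List.length_nil, Nat.cast_zero, add_zero]
      rw [runsGo_cons]
      simp [List.append_assoc]

-- ===== B-side: the staged boundary construction equals the run recursion =====

theorem head?_dropWhile_ne (c : Char) (t : List Char) :
    ∀ d, (t.dropWhile (· == c)).head? = some d → d ≠ c := by
  induction t with
  | nil => simp
  | cons e t ih =>
    by_cases h : e = c
    · subst h; simpa [List.dropWhile_cons] using ih
    · intro d hd
      have hb : (e == c) = false := by simpa using h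
      simp [List.dropWhile_cons, hb] at hd
      subst hd; exact h

theorem cuts_decomp (k : Nat) (hk : 1 ≤ k) (c : Char) (rest : List Char)
    (hr : ∀ d, rest.head? = some d → d ≠ c) :
    cutsOf (List.replicate k c ++ rest) = 0 :: (cutsOf rest).map (k + ·) := by
  unfold cutsOf
  have hlen : (List.replicate k c ++ rest).length = k + rest.length := by simp
  rw [hlen, show k + rest.length + 1 = k + (rest.length + 1) from by omega,
    List.range_add, List.filter_append, List.filter_map]
  have h1 : List.filter
      (fun i => i == 0 || i == k + rest.length ||
        !((List.replicate k c ++ rest)[i]? == (List.replicate k c ++ rest)[i - 1]?))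
      (List.range k) = [0] := by
    rw [List.filter_congr (q := fun i => i == 0) ?_]
    · cases k with
      | zero => omega
      | succ k' =>
        rw [List.range_succ_eq_map, List.filter_cons, List.filter_map]
        simp [Function.comp]
    · intro i hi
      rw [List.mem_range] at hi
      cases i with
      | zero => simp
      | succ j =>
        have hne : ¬ (j + 1 = k + rest.length) := by omega
        have e1 : (List.replicate k c ++ rest)[j + 1]? = some c := by
          rw [List.getElem?_append_left (by simpa using hi), List.getElem?_replicate,
            if_pos hi]
        have e2 : (List.replicate k c ++ rest)[j]? = some c := by
          rw [List.getElem?_append_left (by simp only [List.length_replicate]; omega),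
            List.getElem?_replicate, if_pos (by omega)]
        simp [e1, e2, hne]
  rw [h1, List.singleton_append]
  congr 1
  congr 1
  apply List.filter_congr
  intro j hj
  rw [List.mem_range] at hj
  show (k + j == 0 || k + j == k + rest.length ||
      !((List.replicate k c ++ rest)[k + j]? == (List.replicate k c ++ rest)[k + j - 1]?)) =
    (j == 0 || j == rest.length || !(rest[j]? == rest[j - 1]?))
  have hk0 : (k + j == 0) = false := by
    simp only [beq_eq_false_iff_ne, ne_eq]; omega
  have hkeq : (k + j == k + rest.length) = (j == rest.length) := by
    by_cases h : j = rest.length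
    · simp [h]
    · have h2 : ¬ (k + j = k + rest.length) := by omega
      simp [h, h2]
  have eR : (List.replicate k c ++ rest)[k + j]? = rest[j]? := by
    rw [List.getElem?_append_right (by simp)]
    simp
  cases j with
  | zero =>
    simp only [hk0, hkeq, Bool.false_or]
    have e2 : (List.replicate k c ++ rest)[k - 1]? = some c := by
      rw [List.getElem?_append_left (by simp only [List.length_replicate]; omega),
        List.getElem?_replicate, if_pos (by omega)]
    cases hrest : rest with
    | nil => simp
    | cons d r' =>
      have hdc : d ≠ c := hr d (by rw [hrest]; rfl)
      rw [hrest] at eR e2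
      simp [eR, e2, hdc]
  | succ j' =>
    have e2 : (List.replicate k c ++ rest)[k + (j' + 1) - 1]? = rest[j' + 1 - 1]? := by
      rw [show k + (j' + 1) - 1 = k + j' from by omega,
        List.getElem?_append_right (by simp)]
      simp
    rw [hk0, hkeq, eR, e2]
    simp

theorem cutsOf_head (l : List Char) : ∃ m, cutsOf l = 0 :: m := by
  refine ⟨(cutsOf l).tail, ?_⟩
  conv_lhs => rw [cutsOf, List.range_succ_eq_map, List.filter_cons]
  simp [cutsOf, List.range_succ_eq_map]

theorem joinSlices_decomp (min_reps : Int) (k : Nat) (hk : 1 ≤ k) (c : Char)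
    (rest : List Char) (hr : ∀ d, rest.head? = some d → d ≠ c) :
    joinSlices min_reps (List.replicate k c ++ rest) (cutsOf (List.replicate k c ++ rest)) =
      (if min_reps ≤ (k : Int) then List.replicate k c else []) ++
        joinSlices min_reps rest (cutsOf rest) := by
  rw [cuts_decomp k hk c rest hr]
  obtain ⟨m', hm⟩ := cutsOf_head rest
  unfold joinSlices
  rw [hm]
  simp only [List.map_cons, List.drop_succ_cons, List.drop_zero, List.zip_cons_cons,
    List.flatMap_cons, Nat.add_zero]
  congr 1
  · -- the first pair (0, k): the whole leading run
    simp only [Nat.cast_zero, sub_zero, Nat.sub_zero]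
    split_ifs with h
    · rw [List.take_append, List.take_replicate]
      simp
    · rfl
  · -- the remaining pairs, all shifted by k
    rw [show ((k : Nat) :: List.map (fun x => k + x) m')
          = List.map (fun x => k + x) (0 :: m') from by simp,
      List.zip_map, List.flatMap_map]
    have hfun : ∀ p : Nat × Nat,
        (if min_reps ≤ (((Prod.map (fun x => k + x) (fun x => k + x) p).2 : Nat) : Int)
              - (((Prod.map (fun x => k + x) (fun x => k + x) p).1 : Nat) : Int) then
          ((List.replicate k c ++ rest).drop (Prod.map (fun x => k + x) (fun x => k + x) p).1).take
            ((Prod.map (fun x => k + x) (fun x => k + x) p).2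
              - (Prod.map (fun x => k + x) (fun x => k + x) p).1)
        else [])
        = (if min_reps ≤ ((p.2 : Nat) : Int) - ((p.1 : Nat) : Int) then
            (rest.drop p.1).take (p.2 - p.1) else []) := by
      intro p
      obtain ⟨a, b⟩ := p
      simp only [Prod.map_fst, Prod.map_snd]
      have hcast : ((k + b : Nat) : Int) - ((k + a : Nat) : Int) = (b : Int) - (a : Int) := by
        push_cast; ring
      have hdrop : (List.replicate k c ++ rest).drop (k + a) = rest.drop a := by
        rw [List.drop_append]
        simp [List.drop_eq_nil_of_le]
      rw [hcast, hdrop, Nat.add_sub_add_left]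
    exact List.flatMap_congr (fun p _ => hfun p)

theorem joinSlices_eq_runs (min_reps : Int) (l : List Char) :
    joinSlices min_reps l (cutsOf l) = runsGo min_reps l := by
  suffices H : ∀ (n : Nat) (l : List Char), l.length ≤ n →
      joinSlices min_reps l (cutsOf l) = runsGo min_reps l from H l.length l le_rfl
  intro n
  induction n with
  | zero =>
    intro l hl
    have : l = [] := by cases l with | nil => rfl | cons c t => simp at hl
    subst this
    rw [runsGo]; rfl
  | succ n ih =>
    intro l hl
    cases l with
    | nil => rw [runsGo]; rfl
    | cons c t =>
      have hsplit : c :: t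
          = List.replicate ((t.takeWhile (· == c)).length + 1) c ++ t.dropWhile (· == c) := by
        conv_lhs => rw [← List.takeWhile_append_dropWhile (p := (· == c)) (l := t)]
        rw [show (c :: (t.takeWhile (· == c) ++ t.dropWhile (· == c)))
              = (c :: t.takeWhile (· == c)) ++ t.dropWhile (· == c) from rfl,
          takeWhile_eq_replicate]
        simp [List.replicate_succ]
      rw [runsGo_cons, hsplit,
        joinSlices_decomp min_reps _ (by omega) c _ (head?_dropWhile_ne c t),
        ih _ (by have := List.length_dropWhile_le (p := (· == c)) (l := t); simp at hl; omega)]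
      congr 1
      rw [emitRun]
      have hcast : (1 : Int) + ((t.takeWhile (· == c)).length : Int)
          = (((t.takeWhile (· == c)).length + 1 : Nat) : Int) := by push_cast; ring
      rw [hcast]
      split_ifs with h
      · simp
      · rfl

-- ===== VERDICT (by name: the statement is the Claim_ definition above) =====
theorem process_spec : Claim_equal_process := by
  intro text min_reps _ hpre
  unfold Spec_process process process_alt
  rw [joinSlices_eq_runs]
  rcases hpre with hmin | hempty
  · cases hl : text.toList with
    | nil => rw [runsGo]; simp [processFin]
    | cons c t =>
      rw [List.foldl_cons, show processStep min_reps ([], none, 0) c = ([], some c, 1) by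
        simp [processStep]]
      rw [main_invariant min_reps t [] c 1 le_rfl, runsGo_cons]
      simp
  · subst hempty
    rw [show ("" : String).toList = [] from rfl, runsGo]
    simp [processFin]

@[simp] theorem process_raises : Claim_raises_process := by
  unfold Claim_raises_process
  refine ⟨?_, by decide, by decide, by decide⟩
  intro text min_reps _ hr hpre
  rcases hr with ⟨hne, hle⟩
  rcases hpre with h | h
  · omega
  · exact hne h
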